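-- pv_equiv track=rewrite | github.com/ishaanbuildsthings/leetcode | problems/Leetcode/544. Output Contest Matches.py | findContestMatch
-- ===== SOURCE A (Python) =====
-- def findContestMatch(n: int) -> str:
--     arr = [f'({i+1},{n-i})' for i in range(n // 2)]
--     while len(arr) > 1:
--         nt = []
--         for i in range(0, len(arr) // 2):
--             first = arr[i]
--             second = arr[-1 - i]
--             pair = f'({first},{second})'
--             nt.append(pair)
--         arr = nt
--
--     return arr[0]
-- ===== SOURCE B (Python) =====
-- def findContestMatch(n: int) -> str:
--     def build(lst):
--         if len(lst) <= 1:
--             return lst[0]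
--         return build([f'({lst[i]},{lst[-1 - i]})' for i in range(len(lst) // 2)])
--
--     return build([str(i) for i in range(1, n + 1)])
-- ===== Notes on version B (the rewrite author's own statement) =====
-- stated objective: alternative
-- what changed: Replaces the special-cased first level plus iterative while-loop folding with a single uniform divide-and-conquer recursion starting from the list of team labels 1..n.
-- crash fix: On n = 1 A raises IndexError (its first-level list is empty so arr[0] fails), while B's recursion starts from the one-element label list and returns '1'. — e.g. on findContestMatch(1): A raises IndexError, B returns "1"
import Mathlib
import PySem

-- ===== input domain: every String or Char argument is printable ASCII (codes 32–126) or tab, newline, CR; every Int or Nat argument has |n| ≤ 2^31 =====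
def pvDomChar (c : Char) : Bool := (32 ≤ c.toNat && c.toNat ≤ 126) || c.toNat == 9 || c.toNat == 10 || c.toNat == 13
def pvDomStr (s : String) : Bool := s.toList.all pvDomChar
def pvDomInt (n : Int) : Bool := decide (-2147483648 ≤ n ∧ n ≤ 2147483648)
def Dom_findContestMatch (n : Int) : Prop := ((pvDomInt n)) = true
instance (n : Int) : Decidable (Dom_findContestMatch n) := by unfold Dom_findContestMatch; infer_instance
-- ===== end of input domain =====

-- B replaces A's first-level comprehension + iterative while-loop with one uniform
-- divide-and-conquer recursion starting from the team labels 1..n (alternative decomposition).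

-- ===== PORT A =====
-- one pass of A's while-loop body: nt = [f'({arr[i]},{arr[-1-i]})' for i in range(0, len(arr)//2)]
-- indices i and -1-i are always in range here, so the IndexError default '' is never used
def pvStepA (arr : List String) : List String :=
  (List.range (arr.length / 2)).map (fun (i : Nat) =>
    "(" ++ (PySem.List.pyGet? arr (i : Int)).getD "" ++ ","
        ++ (PySem.List.pyGet? arr (-1 - (i : Int))).getD "" ++ ")")

theorem pvStepA_length (arr : List String) : (pvStepA arr).length = arr.length / 2 := by
  simp [pvStepA]

-- while len(arr) > 1: arr = pvStepA arr
def pvLoopA (arr : List String) : List String :=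
  if 1 < arr.length then pvLoopA (pvStepA arr) else arr
termination_by arr.length
decreasing_by simp only [pvStepA_length]; omega

def findContestMatch (n : Int) : String :=
  let arr := (List.range (PySem.Int.floordiv n 2).toNat).map (fun (i : Nat) =>
    "(" ++ PySem.Int.toStr ((i : Int) + 1) ++ "," ++ PySem.Int.toStr (n - (i : Int)) ++ ")")
  -- arr[0]: IndexError (excluded by Pre_) ported as the never-used default ''
  (PySem.List.pyGet? (pvLoopA arr) 0).getD ""

-- ===== PORT B =====
-- def build(lst): if len(lst) <= 1: return lst[0]; return build([f'({lst[i]},{lst[-1-i]})' for i in range(len(lst)//2)])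
def pvBuildB (lst : List String) : String :=
  if lst.length ≤ 1 then (PySem.List.pyGet? lst 0).getD ""  -- lst[0]; IndexError (excluded by Pre_) as unused default ''
  else pvBuildB ((List.range (lst.length / 2)).map (fun (i : Nat) =>
    "(" ++ (PySem.List.pyGet? lst (i : Int)).getD "" ++ ","
        ++ (PySem.List.pyGet? lst (-1 - (i : Int))).getD "" ++ ")"))
termination_by lst.length
decreasing_by simp only [List.length_map, List.length_range]; omega

-- build([str(i) for i in range(1, n+1)])
def findContestMatch_alt (n : Int) : String :=
  pvBuildB ((List.range n.toNat).map (fun (i : Nat) => PySem.Int.toStr ((i : Int) + 1)))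

-- ===== PRECONDITION & SPEC =====
-- A raises IndexError (arr[0] on an empty list) exactly when n ≤ 1, so those inputs are excluded.
def Pre_findContestMatch (n : Int) : Prop := 2 ≤ n
instance (n : Int) : Decidable (Pre_findContestMatch n) := by unfold Pre_findContestMatch; infer_instance
def pvWitness_findContestMatch : Int := (4)

-- On n = 1 A raises IndexError (its first-level list is empty so arr[0] fails), while B's
-- recursion starts from the one-element label list ['1'] and returns '1'.
def Raises_findContestMatch (n : Int) : Prop := n = 1
instance (n : Int) : Decidable (Raises_findContestMatch n) := by unfold Raises_findContestMatch; infer_instance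
def pvRaiseWitness_findContestMatch : Int := (1)
def pvRaiseWitnessOut_findContestMatch : String := "1"

def Spec_findContestMatch (n : Int) (out : String) : Prop := out = findContestMatch_alt n
instance (n : Int) (out : String) : Decidable (Spec_findContestMatch n out) := by unfold Spec_findContestMatch; infer_instance

-- ===== CLAIM (what is proved, stated in full; the proofs are below) =====
def Claim_equal_findContestMatch : Prop := ∀ (n : Int), Dom_findContestMatch n → Pre_findContestMatch n → Spec_findContestMatch n (findContestMatch n)
def Claim_raises_findContestMatch : Prop := (∀ (n : Int), Dom_findContestMatch n → Raises_findContestMatch n → ¬ Pre_findContestMatch n) ∧ (Dom_findContestMatch (pvRaiseWitness_findContestMatch) ∧ Raises_findContestMatch (pvRaiseWitness_findContestMatch) ∧ findContestMatch_alt (pvRaiseWitness_findContestMatch) = pvRaiseWitnessOut_findContestMatch)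

-- ===== LEMMAS AND PROOFS =====

-- B's recursive body on lst is exactly pvStepA lst
theorem pvBuildB_step (lst : List String) (h : ¬ lst.length ≤ 1) :
    pvBuildB lst = pvBuildB (pvStepA lst) := by
  rw [pvBuildB.eq_def]
  simp only [h, if_false]
  rfl

-- B's recursion computes "first element of A's loop fixpoint" on any non-empty list
theorem pvBuildB_eq_loopA (k : Nat) : ∀ lst : List String, lst.length ≤ k → 1 ≤ lst.length →
    pvBuildB lst = (PySem.List.pyGet? (pvLoopA lst) 0).getD "" := by
  induction k with
  | zero => intro lst h1 h2; omega
  | succ k ih =>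
    intro lst h1 h2
    by_cases hle : lst.length ≤ 1
    · rw [pvBuildB.eq_def, pvLoopA.eq_def]
      have : ¬ 1 < lst.length := by omega
      simp [hle, this]
    · rw [pvBuildB_step lst hle, pvLoopA.eq_def]
      have h1' : 1 < lst.length := by omega
      simp only [h1', if_true]
      exact ih (pvStepA lst) (by rw [pvStepA_length]; omega) (by rw [pvStepA_length]; omega)

-- the labels list
theorem pvLabels_length (n : Int) :
    ((List.range n.toNat).map (fun (i : Nat) => PySem.Int.toStr ((i : Int) + 1))).length = n.toNat := by
  simp

-- the first recursion step of B on the labels 1..n produces A's first-level list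
theorem pvStep_labels (n : Int) (hn : 2 ≤ n) :
    pvStepA ((List.range n.toNat).map (fun (i : Nat) => PySem.Int.toStr ((i : Int) + 1)))
    = (List.range (PySem.Int.floordiv n 2).toNat).map (fun (i : Nat) =>
        "(" ++ PySem.Int.toStr ((i : Int) + 1) ++ "," ++ PySem.Int.toStr (n - (i : Int)) ++ ")") := by
  have hfd : (PySem.Int.floordiv n 2).toNat = n.toNat / 2 := by
    rw [PySem.Int.floordiv_eq_ediv_of_pos (by omega)]
    omega
  apply List.ext_getElem
  · simp [pvStepA]; omega
  · intro i h1 h2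
    have hi : i < n.toNat / 2 := by
      simp only [pvStepA, List.length_map, List.length_range] at h1; omega
    simp only [pvStepA, List.getElem_map, List.getElem_range, List.length_map, List.length_range]
    have hpos : (PySem.List.pyGet? ((List.range n.toNat).map (fun (j : Nat) => PySem.Int.toStr ((j : Int) + 1))) (i : Int))
        = some (PySem.Int.toStr ((i : Int) + 1)) := by
      rw [PySem.List.pyGet?_natCast]
      have : i < n.toNat := by omega
      simp [this]
    have hneg : (PySem.List.pyGet? ((List.range n.toNat).map (fun (j : Nat) => PySem.Int.toStr ((j : Int) + 1))) (-1 - (i : Int)))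
        = some (PySem.Int.toStr (n - (i : Int))) := by
      have he : (-1 - (i : Int)) = -(((i + 1 : Nat) : Int)) := by push_cast; ring
      rw [he, PySem.List.pyGet?_neg_natCast _ _ (by omega) (by rw [pvLabels_length]; omega)]
      rw [pvLabels_length]
      have hlt : n.toNat - (i + 1) < n.toNat := by omega
      simp only [List.getElem?_map, List.getElem?_range, hlt, Option.map_some]
      congr 2
      have : ((n.toNat - (i + 1) : Nat) : Int) = n - 1 - i := by omega
      rw [this]; ring
    simp [hpos, hneg]

-- ===== VERDICT (by name: the statement is the Claim_ definition above) =====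
theorem findContestMatch_spec : Claim_equal_findContestMatch := by
  intro n _ hpre
  unfold Spec_findContestMatch findContestMatch findContestMatch_alt
  have hn : 2 ≤ n := hpre
  have hfd : (PySem.Int.floordiv n 2).toNat = n.toNat / 2 := by
    rw [PySem.Int.floordiv_eq_ediv_of_pos (by omega)]; omega
  rw [pvBuildB_step ((List.range n.toNat).map (fun (i : Nat) => PySem.Int.toStr ((i : Int) + 1)))
      (by simp only [pvLabels_length]; omega), pvStep_labels n hn]
  refine (pvBuildB_eq_loopA _ _ (le_refl _) ?_).symm
  simp only [List.length_map, List.length_range, hfd]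
  omega

theorem findContestMatch_raises : Claim_raises_findContestMatch := by
  unfold Claim_raises_findContestMatch
  constructor
  · intro n _ hr
    unfold Raises_findContestMatch at hr
    unfold Pre_findContestMatch
    omega
  · refine ⟨by decide, rfl, ?_⟩
    show pvBuildB _ = _
    rw [pvBuildB.eq_def]
    norm_num [pvRaiseWitness_findContestMatch, pvRaiseWitnessOut_findContestMatch,
      PySem.Int.toStr]
    decide

-- self-check: the crash-fix region really lies outside Pre_
theorem pvRaisesOutsidePre_ok : ∀ (n : Int), Dom_findContestMatch n → Raises_findContestMatch n → ¬ Pre_findContestMatch n := by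
  have h := findContestMatch_raises
  unfold Claim_raises_findContestMatch at h
  exact h.1
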